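-- pv_equiv track=rewrite | github.com/dailysound/Programmers_Python | Python3/Level2/짝지어 제거하기.py | solution
-- ===== SOURCE A (Python) =====
-- def solution(s):
--     match = []
--     for i in range(len(s)):
--         if not match:
--             match.append(s[i])
--         else:
--             if s[i] == match[-1]: # match의 마지막 값과 일치하면 match에서 문자열 빼기
--                 match.pop()
--             else: # 일치하지 않으면
--                 match.append(s[i])
--
--     if match: #match에 값이 들어가 있으면 성공적으로 수행 못한 경우임
--         return 0
--     else:
--         return 1
-- ===== SOURCE B (Python) =====
-- def solution(s):
--     chars = list(s)
--     i = 0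
--     while i + 1 < len(chars):
--         if chars[i] == chars[i + 1]:
--             del chars[i:i + 2]
--             if i > 0:
--                 i -= 1
--         else:
--             i += 1
--     return 1 if not chars else 0
-- ===== Notes on version B (the rewrite author's own statement) =====
-- stated objective: alternative
-- what changed: Replaces A's auxiliary stack with in-place reduction of the character list: a cursor scans for an adjacent equal pair, deletes both characters from the list and steps back one position (the earliest place a new pair can appear), and the answer is whether the list empties; correctness rests on confluence of adjacent-pair removal, proved via a canonical reduced form.
import Mathlib
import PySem

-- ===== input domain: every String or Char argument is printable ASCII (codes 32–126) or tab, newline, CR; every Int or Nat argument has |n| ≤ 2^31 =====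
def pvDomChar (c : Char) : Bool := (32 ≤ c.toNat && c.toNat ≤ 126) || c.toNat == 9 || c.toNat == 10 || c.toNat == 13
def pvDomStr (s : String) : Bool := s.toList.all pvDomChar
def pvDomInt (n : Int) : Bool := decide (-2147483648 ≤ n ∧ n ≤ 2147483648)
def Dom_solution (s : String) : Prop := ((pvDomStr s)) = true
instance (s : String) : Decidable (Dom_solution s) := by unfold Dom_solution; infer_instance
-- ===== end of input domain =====

-- B replaces A's auxiliary stack by in-place reduction: a cursor deletes adjacent equal pairs from
-- the list (stepping back after each deletion) until none remain; adjacent-pair removal is confluent,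
-- so the emptiness answer is identical (proved below via the canonical reduced form `red`).

-- ===== PORT A =====
-- one iteration of A's loop body; `match[-1]` is the last element (the list is nonempty in that branch)
def stepA (st : List Char) (c : Char) : List Char :=
  if st = [] then st ++ [c]
  else if st.getLast? = some c then st.dropLast
  else st ++ [c]

def solution (s : String) : Int :=
  let m := s.toList.foldl stepA []
  if m ≠ [] then 0 else 1

-- ===== PORT B =====
-- B's while loop: cursor i over the in-place list; delete an adjacent equal pair and step
-- back.  The fuel argument only makes the recursion structural: each iteration decreases
-- 2*len-i, which starts at 2*len, so fuel 2*len always outlasts the Python loop.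
def loopB : Nat → Nat → List Char → List Char
  | 0, _, chars => chars
  | fuel + 1, i, chars =>
    if h : i + 1 < chars.length then
      if chars[i]'(Nat.lt_of_succ_lt h) = chars[i + 1]'h then
        loopB fuel (i - 1) (chars.take i ++ chars.drop (i + 2))
      else
        loopB fuel (i + 1) chars
    else chars

def solution_alt (s : String) : Int :=
  if loopB (2 * s.toList.length) 0 s.toList = [] then 1 else 0

-- ===== PRECONDITION & SPEC =====
def Spec_solution (s : String) (out : Int) : Prop := out = solution_alt s
instance (s : String) (out : Int) : Decidable (Spec_solution s out) := by unfold Spec_solution; infer_instance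

-- ===== CLAIM (what is proved, stated in full; the proofs are below) =====
def Claim_equal_solution : Prop := ∀ (s : String), Dom_solution s → Spec_solution s (solution s)

-- ===== LEMMAS AND PROOFS =====

-- canonical reduced form: right-to-left pair cancellation
def red : List Char → List Char
  | [] => []
  | a :: t =>
    match red t with
    | [] => [a]
    | d :: ds => if a = d then ds else a :: d :: ds

-- the reduced form has no adjacent equal characters
theorem red_chain : ∀ (l : List Char), List.IsChain (· ≠ ·) (red l)
  | [] => List.isChain_nil
  | a :: t => by
    have ih := red_chain t
    simp only [red]
    cases h : red t with
    | nil => exact List.isChain_singleton a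
    | cons d ds =>
      rw [h] at ih
      by_cases had : a = d
      · simp only [if_pos had]; exact ih.tail
      · simp only [if_neg had]
        exact List.isChain_cons_cons.mpr ⟨had, ih⟩

-- a list with no adjacent equal characters is already reduced
theorem chain_red : ∀ {l : List Char}, List.IsChain (· ≠ ·) l → red l = l
  | [], _ => rfl
  | [_], _ => rfl
  | a :: b :: t, h => by
    obtain ⟨hab, ht⟩ := List.isChain_cons_cons.mp h
    rw [red, chain_red ht]
    simp [hab]

-- cancelling a doubled character in front leaves the reduced form unchanged
theorem red_cancel (a : Char) (l : List Char) : red (a :: a :: l) = red l := by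
  have hch := red_chain l
  cases h' : red l with
  | nil =>
    have e1 : red (a :: l) = [a] := by rw [red, h']
    rw [red, e1]
    simp [h']
  | cons d ds =>
    have e1 : red (a :: l) = if a = d then ds else a :: d :: ds := by rw [red, h']
    by_cases had : a = d
    · rw [if_pos had] at e1
      cases ds with
      | nil => rw [red, e1]; simpa [had] using h'.symm
      | cons e es =>
        rw [h'] at hch
        have hne : d ≠ e := hch.rel_head
        rw [red, e1]
        simp [had, hne, h']
    · rw [if_neg had] at e1
      rw [red, e1]
      simp [h']

-- cancelling a doubled character anywhere leaves the reduced form unchanged (confluence)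
theorem red_cancel_mid (u : List Char) (a : Char) (v : List Char) :
    red (u ++ a :: a :: v) = red (u ++ v) := by
  induction u with
  | nil => exact red_cancel a v
  | cons x u ih => simp only [List.cons_append, red, ih]

-- a list of length ≤ 1 is trivially a chain
theorem chain_take_one (l : List Char) : List.IsChain (· ≠ ·) (l.take 1) := by
  cases l with
  | nil => exact List.isChain_nil
  | cons x xs => simpa using List.isChain_singleton x

-- invariant: the first i+1 characters contain no adjacent pair; then the loop computes red
theorem loopB_eq_red (n : Nat) : ∀ (i : Nat) (chars : List Char), 2 * chars.length - i ≤ n →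
    List.IsChain (· ≠ ·) (chars.take (i + 1)) → loopB n i chars = red chars := by
  induction n with
  | zero =>
    intro i chars hn hch
    rw [loopB]
    have e : chars.take (i + 1) = chars := List.take_of_length_le (by omega)
    rw [e] at hch
    exact (chain_red hch).symm
  | succ n ih =>
    intro i chars hn hch
    rw [loopB]
    split
    · rename_i h
      split
      · rename_i heq
        have hinv : List.IsChain (· ≠ ·)
            ((chars.take i ++ chars.drop (i + 2)).take (i - 1 + 1)) := by
          by_cases hi : i = 0
          · subst hi
            simpa using chain_take_one (chars.drop 2)
          · have hi1 : i - 1 + 1 = i := by omega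
            have hlt : (chars.take i).length = i := by simp; omega
            rw [hi1, List.take_left' hlt]
            have e : chars.take i = (chars.take (i + 1)).take i := by
              rw [List.take_take]
              congr 1
              omega
            rw [e]
            exact hch.take i
        rw [ih (i - 1) _
          (by simp only [List.length_append, List.length_take, List.length_drop]; omega) hinv]
        have hsplit : chars =
            chars.take i ++ chars[i]'(by omega) :: chars[i + 1]'h :: chars.drop (i + 2) := by
          conv_lhs => rw [← List.take_append_drop i chars]
          rw [List.drop_eq_getElem_cons (show i < chars.length by omega),
              List.drop_eq_getElem_cons (show i + 1 < chars.length from h)]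
        conv_rhs => rw [hsplit, heq]
        exact (red_cancel_mid _ _ _).symm
      · rename_i hne
        have hgi : i < chars.length := by omega
        have hinv : List.IsChain (· ≠ ·) (chars.take (i + 1 + 1)) := by
          rw [List.take_succ_eq_append_getElem h]
          refine hch.append (List.isChain_singleton _) ?_
          intro x hx y hy
          simp only [List.head?_cons, Option.mem_def, Option.some.injEq] at hy
          rw [List.take_succ_eq_append_getElem hgi] at hx
          simp only [List.getLast?_append, List.getLast?_singleton, Option.some_or,
            Option.mem_def, Option.some.injEq] at hx
          subst hx
          subst hy
          exact hne
        exact ih (i + 1) chars (by omega) hinv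
    · rename_i h
      have e : chars.take (i + 1) = chars := List.take_of_length_le (by omega)
      rw [e] at hch
      exact (chain_red hch).symm

-- A's step applied to a reduced form = reducing after appending one character
theorem red_snoc (l : List Char) (c : Char) : red (l ++ [c]) = stepA (red l) c := by
  induction l with
  | nil => simp [red, stepA]
  | cons a t ih =>
    simp only [List.cons_append, red]
    rw [ih]
    cases h : red t with
    | nil =>
      by_cases hac : a = c <;> simp [stepA, hac]
    | cons d ds =>
      by_cases hlast : (d :: ds).getLast? = some c
      · simp only [stepA, reduceCtorEq, if_neg, hlast, if_pos rfl, List.cons_ne_nil, if_false]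
        by_cases had : a = d
        · subst had
          simp only [if_pos rfl]
          cases ds with
          | nil =>
            simp only [List.getLast?_singleton, Option.some.injEq] at hlast
            simp [stepA, hlast]
          | cons e es =>
            have hl2 : (e :: es).getLast? = some c := by
              rwa [List.getLast?_cons_cons] at hlast
            simp [stepA, hl2, List.dropLast_cons_of_ne_nil]
        · have hl3 : (a :: d :: ds).getLast? = some c := by
            rwa [List.getLast?_cons_cons]
          simp only [if_neg had, stepA, List.cons_ne_nil, if_false, hl3, if_pos rfl]
          cases ds with
          | nil => simp [red, had]
          | cons e es =>
            simp [List.dropLast_cons_of_ne_nil, had]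
      · simp only [stepA, List.cons_ne_nil, if_false, hlast, if_neg hlast]
        by_cases had : a = d
        · subst had
          simp only [if_pos rfl]
          cases ds with
          | nil =>
            simp only [List.getLast?_singleton, Option.some.injEq] at hlast
            simp [stepA, Ne.symm hlast]
          | cons e es =>
            have hl2 : ¬ (e :: es).getLast? = some c := by
              rwa [List.getLast?_cons_cons] at hlast
            simp [stepA, hl2]
        · have hl3 : ¬ (a :: d :: ds).getLast? = some c := by
            rwa [List.getLast?_cons_cons]
          simp [stepA, had, hl3, hlast]

theorem foldA_eq_red (l : List Char) : l.foldl stepA [] = red l := by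
  induction l using List.reverseRecOn with
  | nil => rfl
  | append_singleton t c ih => rw [List.foldl_append, red_snoc, ih]; rfl

-- ===== VERDICT (by name: the statement is the Claim_ definition above) =====
theorem solution_spec : Claim_equal_solution := by
  intro s _
  unfold Spec_solution solution solution_alt
  rw [foldA_eq_red,
    loopB_eq_red (2 * s.toList.length) 0 s.toList (by omega) (chain_take_one s.toList)]
  by_cases h : red s.toList = [] <;> simp [h]
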